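-- pv_equiv track=rewrite | github.com/UjjvalDE/hackerearth | Find_Champion_I.py | findChampionship
-- ===== SOURCE A (Python) =====
-- def findChampionship(rankings):
--     n = len(rankings)
--     champion = None
--     max_points = 0
--     for i in range(n):
--         points = sum(1 << k for k in range(n) if rankings[i][k] == 'win')
--         if points > max_points:
--             max_points = points
--             champion = i + 1
--     return champion
-- ===== SOURCE B (Python) =====
-- def findChampionship(rankings):
--     n = len(rankings)
--     if n == 0:
--         return None
--     # Column-elimination: the bitmask score orders rows lexicographically by their
--     # win bits from the highest column down, so sweep columns n-1..0, keeping only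
--     # the candidates that win at the current column whenever any candidate does.
--     candidates = list(range(n))
--     any_win = False
--     for k in range(n - 1, -1, -1):
--         winners = [i for i in candidates if rankings[i][k] == 'win']
--         if winners:
--             candidates = winners
--             any_win = True
--     if not any_win:
--         return None
--     return candidates[0] + 1
-- ===== Notes on version B (the rewrite author's own statement) =====
-- stated objective: alternative
-- what changed: Replaces A's per-row bitmask-score accumulation and running max with a column-wise elimination tournament: sweep columns from highest to lowest, retaining only candidates that win at the current column whenever any candidate does (correct because the bitmask score orders rows lexicographically on their win bits from the highest column down); no scores are ever computed.
import Mathlib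
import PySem

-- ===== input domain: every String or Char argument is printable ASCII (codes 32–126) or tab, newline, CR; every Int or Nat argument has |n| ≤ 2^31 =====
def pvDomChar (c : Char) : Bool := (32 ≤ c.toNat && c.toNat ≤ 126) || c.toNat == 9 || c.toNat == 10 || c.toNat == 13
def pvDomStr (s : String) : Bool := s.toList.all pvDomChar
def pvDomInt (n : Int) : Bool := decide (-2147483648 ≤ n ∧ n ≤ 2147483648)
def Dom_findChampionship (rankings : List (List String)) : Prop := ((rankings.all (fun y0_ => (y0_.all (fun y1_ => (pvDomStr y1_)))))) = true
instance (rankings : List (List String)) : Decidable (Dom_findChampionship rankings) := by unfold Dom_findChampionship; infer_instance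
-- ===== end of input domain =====

-- B replaces A's per-row bitmask-score accumulation + running max with a column-wise elimination
-- tournament over columns n-1..0 (the bitmask score orders rows lexicographically on their win
-- bits from the highest column down); objective: alternative algorithm, same cost.


-- ===== PORT A =====
-- transliteration of the inner comprehension sum(1 << k for k in range(n) if rankings[i][k] == 'win')
def rowPoints (n : Int) (row : List String) : Int :=
  (PySem.List.pyRange 0 n 1).foldl
    (fun acc k => if PySem.List.pyGetD row k "" = "win" then acc + ((1 : Int) <<< k.toNat) else acc) 0

def findChampionship (rankings : List (List String)) : Option Int :=
  let n : Int := rankings.length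
  ((PySem.List.pyRange 0 n 1).foldl
      (fun (st : Option Int × Int) i =>
        let points := rowPoints n (PySem.List.pyGetD rankings i [])
        if st.2 < points then (some (i + 1), points) else st)
      (none, 0)).1

-- ===== PORT B =====
def findChampionship_alt (rankings : List (List String)) : Option Int :=
  let n : Int := rankings.length
  if rankings.length = 0 then none
  else
    let st := (PySem.List.pyRange (n - 1) (-1) (-1)).foldl
      (fun (st : List Int × Bool) k =>
        let winners := st.1.filter (fun i =>
          PySem.List.pyGetD (PySem.List.pyGetD rankings i []) k "" == "win")
        if winners.isEmpty then st else (winners, true))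
      (PySem.List.pyRange 0 n 1, false)
    if st.2 = false then none
    else
      match st.1 with
      | [] => none            -- unreachable: candidates stays nonempty
      | i :: _ => some (i + 1)

-- ===== PRECONDITION & SPEC =====
-- Pre_ excludes exactly the inputs where some row is shorter than the number of rows: there
-- Python A raises IndexError on rankings[i][k].
def Pre_findChampionship (rankings : List (List String)) : Prop :=
  ∀ row ∈ rankings, rankings.length ≤ row.length
instance (rankings : List (List String)) : Decidable (Pre_findChampionship rankings) := by
  unfold Pre_findChampionship; infer_instance

def pvWitness_findChampionship : List (List String) :=
  [["win", "lose"], ["lose", "win"]]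

def Spec_findChampionship (rankings : List (List String)) (out : Option Int) : Prop := out = findChampionship_alt rankings
instance (rankings : List (List String)) (out : Option Int) : Decidable (Spec_findChampionship rankings out) := by unfold Spec_findChampionship; infer_instance

-- ===== CLAIM (what is proved, stated in full; the proofs are below) =====
def Claim_equal_findChampionship : Prop := ∀ (rankings : List (List String)), Dom_findChampionship rankings → Pre_findChampionship rankings → Spec_findChampionship rankings (findChampionship rankings)

-- ===== LEMMAS AND PROOFS =====

-- ---- A-side characterisation: the running-max loop returns the first index of the maximum ----

def loopA : List Int → Int → Option Int × Int → Option Int × Int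
  | [], _, st => st
  | p :: ps, i, st => loopA ps (i + 1) (if st.2 < p then (some (i + 1), p) else st)

lemma foldA_eq_loopA (g : List String → Int) (full : List (List String)) :
    ∀ (k a : Nat) (st : Option Int × Int), a + k = full.length →
    (PySem.List.pyRange (a : Int) (full.length : Int) 1).foldl
      (fun st i =>
        let p := g (PySem.List.pyGetD full i [])
        if st.2 < p then (some (i + 1), p) else st) st
    = loopA ((full.drop a).map g) (a : Int) st := by
  intro k
  induction k with
  | zero =>
    intro a st ha
    have h1 : PySem.List.pyRange (a : Int) (full.length : Int) 1 = [] :=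
      PySem.List.pyRange_one_eq_nil (by omega)
    have h2 : full.drop a = [] := List.drop_eq_nil_of_le (by omega)
    simp [h1, h2, loopA]
  | succ k ih =>
    intro a st ha
    have halt : a < full.length := by omega
    have h1 : PySem.List.pyRange (a : Int) (full.length : Int) 1
        = (a : Int) :: PySem.List.pyRange ((a : Int) + 1) (full.length : Int) 1 :=
      PySem.List.pyRange_one_cons (by exact_mod_cast halt)
    have h2 : full.drop a = full[a] :: full.drop (a + 1) :=
      (List.getElem_cons_drop halt).symm
    have h3 : PySem.List.pyGetD full (a : Int) [] = full[a] := by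
      rw [PySem.List.pyGetD_natCast]
      exact List.getD_eq_getElem full [] halt
    have h4 : ((a : Int) + 1) = ((a + 1 : Nat) : Int) := by push_cast; ring
    rw [h1, h2]
    simp only [List.foldl_cons, List.map_cons, loopA, h3, h4]
    exact ih (a + 1) _ (by omega)

lemma foldl_max_pull (t : List Int) : ∀ (p r : Int),
    t.foldl max (max p r) = max p (t.foldl max r) := by
  induction t with
  | nil => intro p r; rfl
  | cons x t ih =>
    intro p r
    simp only [List.foldl_cons, max_assoc]
    exact ih p (max r x)

lemma max?_id_cons_eq (p : Int) (rest : List Int) :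
    PySem.List.max? (p :: rest) (fun x => x) =
      some (match PySem.List.max? rest (fun x => x) with
            | none => p
            | some mr => max p mr) := by
  cases rest with
  | nil => simp [PySem.List.max?]
  | cons r t =>
    rw [PySem.List.max?_id_cons, PySem.List.max?_id_cons]
    simp only [List.foldl_cons]
    rw [foldl_max_pull t p r]

lemma loopA_spec (ps : List Int) : ∀ (i : Int) (c : Option Int) (m : Int),
    (loopA ps i (c, m)).1 =
      match PySem.List.max? ps (fun x => x) with
      | none => c
      | some mx => if mx ≤ m then c else some (i + (ps.idxOf mx : Int) + 1) := by
  induction ps with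
  | nil => intro i c m; simp [loopA, PySem.List.max?]
  | cons p rest ih =>
    intro i c m
    show (loopA rest (i + 1) (if m < p then (some (i + 1), p) else (c, m))).1 = _
    cases hrest : PySem.List.max? rest (fun x => x) with
    | none =>
      have hr := (PySem.List.max?_eq_none_iff rest (fun x => x)).mp hrest
      subst hr
      by_cases h : m < p
      · simp [loopA, PySem.List.max?_id_cons, h, show ¬ p ≤ m by omega, List.idxOf_cons_self]
      · simp [loopA, PySem.List.max?_id_cons, h, show p ≤ m by omega]
    | some mr =>
      have hcons : PySem.List.max? (p :: rest) (fun x => x) = some (max p mr) := by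
        rw [max?_id_cons_eq, hrest]
      by_cases h : m < p
      · by_cases hmp : mr ≤ p
        · have hmax : max p mr = p := max_eq_left hmp
          simp [h, ih, hrest, hcons, hmp, show ¬ p ≤ m by omega, List.idxOf_cons_self]
        · have hmax : max p mr = mr := max_eq_right (by omega)
          have hne : p ≠ mr := by omega
          simp [h, ih, hrest, hcons, hmax, hmp, show ¬ mr ≤ m by omega,
                List.idxOf_cons_ne _ hne]
          omega
      · by_cases hmm : mr ≤ m
        · have : max p mr ≤ m := by omega
          simp [h, ih, hrest, hcons, hmm, this]
        · have hmax : max p mr = mr := max_eq_right (by omega)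
          have hne : p ≠ mr := by omega
          simp [h, ih, hrest, hcons, hmax, hmm,
                List.idxOf_cons_ne _ hne]
          omega

-- ---- the bitmask score, column by column (proof-only abstractions) ----

def winAt (R : List (List String)) (i : Int) (k : Nat) : Bool :=
  PySem.List.pyGetD (PySem.List.pyGetD R i []) (k : Int) "" == "win"

-- hiScore R i k = the part of row i's bitmask score contributed by columns k..n-1
def hiScore (R : List (List String)) (i : Int) (k : Nat) : Int :=
  ∑ j ∈ Finset.Ico k R.length, (if winAt R i j then (2 : Int) ^ j else 0)

def maxList (l : List Int) : Int := l.foldl max 0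

def MHi (R : List (List String)) (k : Nat) : Int :=
  maxList ((List.range R.length).map (fun i : Nat => hiScore R (i : Int) k))

def candsAt (R : List (List String)) (k : Nat) : List Int :=
  ((List.range R.length).map (fun i : Nat => (i : Int))).filter
    (fun i => hiScore R i k == MHi R k)

lemma hiScore_nonneg (R : List (List String)) (i : Int) (k : Nat) : 0 ≤ hiScore R i k := by
  apply Finset.sum_nonneg
  intro j _
  split
  · positivity
  · exact le_refl 0

lemma hiScore_split (R : List (List String)) (i : Int) {k : Nat} (hk : k < R.length) :
    hiScore R i k = (if winAt R i k then (2 : Int) ^ k else 0) + hiScore R i (k + 1) := by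
  unfold hiScore
  rw [Finset.sum_eq_sum_Ico_succ_bot hk]

lemma hiScore_dvd (R : List (List String)) (i : Int) (k : Nat) :
    ((2 : Int) ^ k) ∣ hiScore R i k := by
  apply Finset.dvd_sum
  intro j hj
  have hkj : k ≤ j := (Finset.mem_Ico.mp hj).1
  split
  · exact pow_dvd_pow 2 hkj
  · exact dvd_zero _

lemma le_maxList {l : List Int} {x : Int} (h : x ∈ l) : x ≤ maxList l :=
  (PySem.List.le_foldl_max l 0).2 x h

lemma maxList_nonneg (l : List Int) : 0 ≤ maxList l :=
  (PySem.List.le_foldl_max l 0).1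

lemma foldl_max_mem (l : List Int) : ∀ a : Int, l.foldl max a ∈ a :: l := by
  induction l with
  | nil => intro a; simp
  | cons x t ih =>
    intro a
    simp only [List.foldl_cons]
    rcases List.mem_cons.mp (ih (max a x)) with h | h
    · rcases max_choice a x with hm | hm
      · rw [h, hm]; exact List.mem_cons_self
      · rw [h, hm]; exact List.mem_cons_of_mem _ List.mem_cons_self
    · exact List.mem_cons_of_mem _ (List.mem_cons_of_mem _ h)

lemma maxList_mem {l : List Int} (hne : l ≠ []) (hnn : ∀ x ∈ l, 0 ≤ x) :
    maxList l ∈ l := by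
  rcases List.mem_cons.mp (foldl_max_mem l 0) with h | h
  · -- maxList l = 0: every element is ≤ 0 and ≥ 0, hence the head is 0 ∈ l
    rcases l with _ | ⟨y, t⟩
    · exact absurd rfl hne
    · have h1 : y ≤ maxList (y :: t) := le_maxList List.mem_cons_self
      have h2 : 0 ≤ y := hnn y List.mem_cons_self
      have h3 : maxList (y :: t) = 0 := h
      have : y = maxList (y :: t) := by omega
      rw [← this]
      exact List.mem_cons_self
  · exact h

lemma le_MHi (R : List (List String)) (k : Nat) {i : Nat} (hilt : i < R.length) :
    hiScore R (i : Int) k ≤ MHi R k :=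
  le_maxList (List.mem_map_of_mem (List.mem_range.mpr hilt))

lemma MHi_nonneg (R : List (List String)) (k : Nat) : 0 ≤ MHi R k :=
  maxList_nonneg _

lemma MHi_attained (R : List (List String)) (k : Nat) (hn : 0 < R.length) :
    ∃ i : Nat, i < R.length ∧ hiScore R (i : Int) k = MHi R k := by
  have hne : ((List.range R.length).map (fun i : Nat => hiScore R (i : Int) k)) ≠ [] := by
    intro hnil
    have := congrArg List.length hnil
    simp only [List.length_map, List.length_range, List.length_nil] at this
    omega
  have hnn : ∀ x ∈ (List.range R.length).map (fun i : Nat => hiScore R (i : Int) k), 0 ≤ x := by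
    intro x hx
    rcases List.mem_map.mp hx with ⟨i, _, rfl⟩
    exact hiScore_nonneg R i k
  have hmem := maxList_mem hne hnn
  rcases List.mem_map.mp hmem with ⟨i, hi, hval⟩
  exact ⟨i, List.mem_range.mp hi, hval⟩

lemma MHi_dvd (R : List (List String)) (k : Nat) (hn : 0 < R.length) :
    ((2 : Int) ^ k) ∣ MHi R k := by
  obtain ⟨i, _, h⟩ := MHi_attained R k hn
  exact h ▸ hiScore_dvd R (i : Int) k

-- a row not maximal at column k+1 stays strictly below MHi (k+1) even after adding bit k
lemma strict_drop (R : List (List String)) (i : Int) {k : Nat} (hk : k < R.length)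
    (hlt : hiScore R i (k + 1) < MHi R (k + 1)) :
    hiScore R i k < MHi R (k + 1) := by
  have hn : 0 < R.length := by omega
  have hd1 := hiScore_dvd R i (k + 1)
  have hd2 := MHi_dvd R (k + 1) hn
  have hstep : hiScore R i (k + 1) + 2 ^ (k + 1) ≤ MHi R (k + 1) := by
    have hdvd : ((2 : Int) ^ (k + 1)) ∣ (MHi R (k + 1) - hiScore R i (k + 1)) :=
      dvd_sub hd2 hd1
    have := Int.le_of_dvd (by omega) hdvd
    omega
  have h2 : (2 : Int) ^ (k + 1) = 2 ^ k + 2 ^ k := by ring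
  have hpos : (0 : Int) < 2 ^ k := by positivity
  rw [hiScore_split R i hk]
  split <;> omega

lemma mem_candsAt {R : List (List String)} {k : Nat} {i : Int} :
    i ∈ candsAt R k ↔ ∃ m : Nat, m < R.length ∧ i = (m : Int) ∧ hiScore R (m : Int) k = MHi R k := by
  unfold candsAt
  constructor
  · intro h
    rcases List.mem_filter.mp h with ⟨hmem, hcond⟩
    rcases List.mem_map.mp hmem with ⟨m, hm, rfl⟩
    exact ⟨m, List.mem_range.mp hm, rfl, by simpa using hcond⟩
  · rintro ⟨m, hm, rfl, hval⟩
    exact List.mem_filter.mpr ⟨List.mem_map.mpr ⟨m, List.mem_range.mpr hm, rfl⟩, by simpa using hval⟩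

-- ---- the elimination step, empty-winners case ----

lemma MHi_step_empty (R : List (List String)) {k : Nat} (hk : k < R.length)
    (hw : ∀ i ∈ candsAt R (k + 1), ¬ winAt R i k = true) :
    MHi R k = MHi R (k + 1) := by
  have hn : 0 < R.length := by omega
  obtain ⟨i, hi, hiM⟩ := MHi_attained R k hn
  obtain ⟨j, hj, hjM⟩ := MHi_attained R (k + 1) hn
  have hjw : ¬ winAt R (j : Int) k = true := hw _ (mem_candsAt.mpr ⟨j, hj, rfl, hjM⟩)
  have hjk : hiScore R (j : Int) k = MHi R (k + 1) := by
    rw [hiScore_split R _ hk, if_neg hjw, hjM]; ring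
  by_cases hcase : hiScore R (i : Int) (k + 1) = MHi R (k + 1)
  · have hiw : ¬ winAt R (i : Int) k = true := hw _ (mem_candsAt.mpr ⟨i, hi, rfl, hcase⟩)
    have : hiScore R (i : Int) k = MHi R (k + 1) := by
      rw [hiScore_split R _ hk, if_neg hiw, hcase]; ring
    omega
  · have hlt : hiScore R (i : Int) (k + 1) < MHi R (k + 1) :=
      lt_of_le_of_ne (le_MHi R (k + 1) hi) hcase
    have h1 : hiScore R (i : Int) k < MHi R (k + 1) := strict_drop R _ hk hlt
    have h2 : MHi R (k + 1) ≤ MHi R k := hjk ▸ le_MHi R k hj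
    omega

lemma cands_step_empty (R : List (List String)) {k : Nat} (hk : k < R.length)
    (hw : ∀ i ∈ candsAt R (k + 1), ¬ winAt R i k = true) :
    candsAt R k = candsAt R (k + 1) := by
  have hM := MHi_step_empty R hk hw
  unfold candsAt
  apply List.filter_congr
  intro i hmem
  rcases List.mem_map.mp hmem with ⟨m, hm, rfl⟩
  have hmn : m < R.length := List.mem_range.mp hm
  rw [Bool.eq_iff_iff]
  simp only [beq_iff_eq, hM]
  constructor
  · intro h
    by_contra hne
    have hlt : hiScore R (m : Int) (k + 1) < MHi R (k + 1) :=
      lt_of_le_of_ne (le_MHi R (k + 1) hmn) hne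
    have := strict_drop R (m : Int) hk hlt
    omega
  · intro h
    have hmna : ¬ winAt R (m : Int) k = true := hw _ (mem_candsAt.mpr ⟨m, hmn, rfl, h⟩)
    rw [hiScore_split R _ hk, if_neg hmna, h]; ring

-- ---- the elimination step, nonempty-winners case ----

lemma MHi_step_win (R : List (List String)) {k : Nat} (hk : k < R.length)
    {w : Int} (hwc : w ∈ candsAt R (k + 1)) (hww : winAt R w k = true) :
    MHi R k = MHi R (k + 1) + 2 ^ k := by
  have hn : 0 < R.length := by omega
  rcases mem_candsAt.mp hwc with ⟨m, hm, rfl, hval⟩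
  have hwk : hiScore R (m : Int) k = MHi R (k + 1) + 2 ^ k := by
    rw [hiScore_split R _ hk, if_pos hww, hval]; ring
  have hlow : MHi R (k + 1) + 2 ^ k ≤ MHi R k := hwk ▸ le_MHi R k hm
  obtain ⟨i, hi, hiM⟩ := MHi_attained R k hn
  have hup : hiScore R (i : Int) k ≤ MHi R (k + 1) + 2 ^ k := by
    have h1 : hiScore R (i : Int) (k + 1) ≤ MHi R (k + 1) := le_MHi R (k + 1) hi
    have hpos : (0 : Int) < 2 ^ k := by positivity
    rw [hiScore_split R _ hk]
    split <;> omega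
  omega

lemma cands_step_win (R : List (List String)) {k : Nat} (hk : k < R.length)
    {w : Int} (hwc : w ∈ candsAt R (k + 1)) (hww : winAt R w k = true) :
    candsAt R k = (candsAt R (k + 1)).filter (fun i => winAt R i k) := by
  have hM := MHi_step_win R hk hwc hww
  unfold candsAt
  rw [List.filter_filter]
  apply List.filter_congr
  intro i hmem
  rcases List.mem_map.mp hmem with ⟨m, hm, rfl⟩
  have hmn : m < R.length := List.mem_range.mp hm
  rw [Bool.eq_iff_iff]
  simp only [beq_iff_eq, Bool.and_eq_true, hM]
  have hpos : (0 : Int) < 2 ^ k := by positivity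
  constructor
  · intro h
    by_cases hwin : winAt R (m : Int) k = true
    · refine ⟨hwin, ?_⟩
      rw [hiScore_split R _ hk, if_pos hwin] at h
      omega
    · exfalso
      rw [hiScore_split R _ hk, if_neg hwin] at h
      have := le_MHi R (k + 1) hmn
      omega
  · rintro ⟨hwin, hval⟩
    rw [hiScore_split R _ hk, if_pos hwin, hval]
    ring

-- ---- one loop iteration of B, in full ----

lemma step_spec (R : List (List String)) {k : Nat} (hk : k < R.length) :
    (if ((candsAt R (k + 1)).filter (fun i => winAt R i k)).isEmpty
     then ((candsAt R (k + 1) : List Int), decide (0 < MHi R (k + 1)))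
     else ((candsAt R (k + 1)).filter (fun i => winAt R i k), true))
    = (candsAt R k, decide (0 < MHi R k)) := by
  by_cases hw : ((candsAt R (k + 1)).filter (fun i => winAt R i k)).isEmpty
  · rw [if_pos hw]
    have hnil : ∀ i ∈ candsAt R (k + 1), ¬ winAt R i k = true := by
      have := List.isEmpty_iff.mp hw
      intro i hi hwin
      have : i ∈ ((candsAt R (k + 1)).filter (fun i => winAt R i k)) :=
        List.mem_filter.mpr ⟨hi, hwin⟩
      simp_all
    rw [cands_step_empty R hk hnil, MHi_step_empty R hk hnil]
  · rw [if_neg hw]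
    have hne : ((candsAt R (k + 1)).filter (fun i => winAt R i k)) ≠ [] := by
      simpa [List.isEmpty_iff] using hw
    obtain ⟨w, hwmem⟩ := List.exists_mem_of_ne_nil _ hne
    rcases List.mem_filter.mp hwmem with ⟨hwc, hww⟩
    have hM := MHi_step_win R hk hwc hww
    have hpos : (0 : Int) < 2 ^ k := by positivity
    have hMn := MHi_nonneg R (k + 1)
    rw [cands_step_win R hk hwc hww]
    have : decide (0 < MHi R k) = true := by
      simp only [decide_eq_true_eq]
      omega
    rw [this]

-- ---- the whole loop of B ----

lemma B_loop (R : List (List String)) : ∀ k : Nat, k ≤ R.length →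
    (PySem.List.pyRange ((k : Int) - 1) (-1) (-1)).foldl
      (fun (st : List Int × Bool) j =>
        let winners := st.1.filter (fun i =>
          PySem.List.pyGetD (PySem.List.pyGetD R i []) j "" == "win")
        if winners.isEmpty then st else (winners, true))
      (candsAt R k, decide (0 < MHi R k))
    = (candsAt R 0, decide (0 < MHi R 0)) := by
  intro k
  induction k with
  | zero =>
    intro _
    rw [PySem.List.pyRange_neg_one_eq_nil (by norm_num)]
    rfl
  | succ k ih =>
    intro hk
    have hcast : ((k + 1 : Nat) : Int) - 1 = (k : Nat) := by push_cast; ring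
    rw [hcast, PySem.List.pyRange_neg_one_cons (by omega), List.foldl_cons]
    have hred :
        (let winners := List.filter (fun i =>
            PySem.List.pyGetD (PySem.List.pyGetD R i []) ((k : Nat) : Int) "" == "win")
            (candsAt R (k + 1), decide (0 < MHi R (k + 1))).1
         if winners.isEmpty then (candsAt R (k + 1), decide (0 < MHi R (k + 1)))
         else (winners, true))
        = ((candsAt R k : List Int), decide (0 < MHi R k)) := step_spec R (by omega)
    rw [hred]
    exact ih (by omega)

-- ---- bridging A's scores to hiScore ----

lemma foldl_if_sum (c : Nat → Bool) (g : Nat → Int) (l : List Nat) :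
    ∀ a : Int, l.foldl (fun acc k => if c k then acc + g k else acc) a
      = a + (l.map (fun k => if c k then g k else 0)).sum := by
  induction l with
  | nil => intro a; simp
  | cons x t ih =>
    intro a
    simp only [List.foldl_cons, List.map_cons, List.sum_cons]
    by_cases h : c x
    · rw [if_pos h, if_pos h, ih]; ring
    · rw [if_neg h, if_neg h, ih]; ring

lemma sum_map_range_eq (f : Nat → Int) : ∀ n : Nat,
    ((List.range n).map f).sum = ∑ j ∈ Finset.range n, f j := by
  intro n
  induction n with
  | zero => simp
  | succ n ih => rw [List.range_succ, Finset.sum_range_succ, List.map_append, List.sum_append, ih]; simp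

lemma rowPoints_eq_hiScore (R : List (List String)) {m : Nat} (hm : m < R.length) :
    rowPoints (R.length : Int) R[m] = hiScore R (m : Int) 0 := by
  unfold rowPoints hiScore
  have hrow : PySem.List.pyGetD R (m : Int) [] = R[m] := by
    rw [PySem.List.pyGetD_natCast]
    exact List.getD_eq_getElem R [] hm
  rw [show ((R.length : Int)) = ((R.length : Nat) : Int) from rfl, PySem.List.pyRange_zero_nat,
      List.foldl_map]
  have hfun : (fun (acc : Int) (k : Nat) =>
      if PySem.List.pyGetD R[m] ((k : Nat) : Int) "" = "win" then acc + ((1 : Int) <<< ((k : Nat) : Int).toNat) else acc)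
      = fun (acc : Int) (k : Nat) => if winAt R (m : Int) k then acc + (2 : Int) ^ k else acc := by
    funext acc k
    have hsh : ((1 : Int) <<< ((k : Nat) : Int).toNat) = (2 : Int) ^ k := by
      rw [Int.toNat_natCast, Int.shiftLeft_eq, one_mul]
    rw [hsh]
    unfold winAt
    rw [hrow]
    by_cases h : PySem.List.pyGetD R[m] ((k : Nat) : Int) "" = "win"
    · rw [if_pos h, if_pos (by simpa [beq_iff_eq] using h)]
    · rw [if_neg h, if_neg (by simpa [beq_iff_eq] using h)]
  rw [hfun, foldl_if_sum (fun k => winAt R (m : Int) k) (fun k => (2 : Int) ^ k) (List.range R.length) 0,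
      zero_add, sum_map_range_eq, Finset.range_eq_Ico]

lemma scores_eq (R : List (List String)) :
    R.map (rowPoints (R.length : Int)) = (List.range R.length).map (fun i : Nat => hiScore R (i : Int) 0) := by
  apply List.ext_getElem
  · simp
  · intro m h1 h2
    simp only [List.getElem_map, List.getElem_range]
    exact rowPoints_eq_hiScore R (by simpa using h1)

-- ---- first index of the maximum: candsAt 0 head vs idxOf ----

lemma head_filter_range (l : List Int) : ∀ {x : Int}, x ∈ l →
    ((List.range l.length).filter (fun i => l.getD i 0 == x)).head? = some (l.idxOf x) := by
  induction l with
  | nil => intro x h; cases h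
  | cons a t ih =>
    intro x hx
    by_cases hax : a = x
    · subst hax
      have hbe : ((a :: t).getD 0 0 == a) = true := by simp
      rw [List.length_cons, List.range_succ_eq_map, List.filter_cons, hbe]
      simp
    · have hxt : x ∈ t := by
        rcases hx with _ | h
        · exact absurd rfl hax
        · assumption
      have hbe : ((a :: t).getD 0 0 == x) = false := by simp [hax]
      rw [List.length_cons, List.range_succ_eq_map, List.filter_cons, hbe,
          if_neg Bool.false_ne_true, List.filter_map, List.head?_map]
      have hcomp : ((fun i => (a :: t).getD i 0 == x) ∘ Nat.succ) = fun i => t.getD i 0 == x := by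
        funext i
        simp [Function.comp]
      rw [hcomp, ih hxt]
      simp [hax]

lemma candsAt_zero_head (R : List (List String)) (hn : 0 < R.length) :
    (candsAt R 0).head? =
      some ((((List.range R.length).map (fun i : Nat => hiScore R (i : Int) 0)).idxOf (MHi R 0) : Nat) : Int) := by
  set l : List Int := (List.range R.length).map (fun i : Nat => hiScore R (i : Int) 0) with hl
  have hlen : l.length = R.length := by simp [hl]
  have hfe : candsAt R 0
      = ((List.range R.length).filter (fun m => l.getD m 0 == MHi R 0)).map (fun m : Nat => (m : Int)) := by
    unfold candsAt
    rw [List.filter_map]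
    congr 1
    apply List.filter_congr
    intro m hm
    have hmn : m < R.length := List.mem_range.mp hm
    have hgd : l[m]?.getD 0 = hiScore R (m : Int) 0 := by
      rw [hl, List.getElem?_eq_getElem (by simpa using hmn)]
      simp
    rw [Bool.eq_iff_iff]
    simp [hgd]
  have hmem : MHi R 0 ∈ l := by
    obtain ⟨i, hi, hval⟩ := MHi_attained R 0 hn
    rw [hl]
    exact List.mem_map.mpr ⟨i, List.mem_range.mpr hi, hval⟩
  rw [hfe, List.head?_map, show List.range R.length = List.range l.length by rw [hlen],
      head_filter_range l hmem]
  rfl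

-- ---- the initial state of B's loop ----

lemma maxList_zeros {l : List Int} (h : ∀ x ∈ l, x = 0) : maxList l = 0 := by
  have h1 := maxList_nonneg l
  rcases List.mem_cons.mp (foldl_max_mem l 0) with h2 | h2
  · exact h2
  · exact h _ h2

lemma hiScore_top (R : List (List String)) (i : Int) : hiScore R i R.length = 0 := by
  unfold hiScore
  simp

lemma MHi_top (R : List (List String)) : MHi R R.length = 0 := by
  unfold MHi
  apply maxList_zeros
  intro x hx
  rcases List.mem_map.mp hx with ⟨i, _, rfl⟩
  exact hiScore_top R (i : Int)

lemma candsAt_top (R : List (List String)) :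
    candsAt R R.length = (List.range R.length).map (fun i : Nat => (i : Int)) := by
  unfold candsAt
  apply List.filter_eq_self.mpr
  intro i hi
  rcases List.mem_map.mp hi with ⟨m, _, rfl⟩
  simp [hiScore_top, MHi_top]

-- ===== VERDICT (by name: the statement is the Claim_ definition above) =====
theorem findChampionship_spec : Claim_equal_findChampionship := by
  intro R _hdom _hpre
  unfold Spec_findChampionship
  by_cases hn0 : R.length = 0
  · have : R = [] := List.eq_nil_of_length_eq_zero hn0
    subst this
    decide
  · have hn : 0 < R.length := Nat.pos_of_ne_zero hn0
    -- A's side: the running-max loop returns the first index of the maximal score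
    have hA : findChampionship R =
        match PySem.List.max? ((List.range R.length).map (fun i : Nat => hiScore R (i : Int) 0)) (fun x => x) with
        | none => none
        | some mx => if mx ≤ 0 then none
            else some (((0 : Nat) : Int) + ((((List.range R.length).map (fun i : Nat => hiScore R (i : Int) 0)).idxOf mx : Nat) : Int) + 1) := by
      unfold findChampionship
      simp only
      rw [show (PySem.List.pyRange (0 : Int) ((R.length : Int)) 1) =
            (PySem.List.pyRange (((0 : Nat) : Int)) ((R.length : Int)) 1) by norm_num]
      rw [foldA_eq_loopA (rowPoints (R.length : Int)) R R.length 0 (none, 0) (by omega)]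
      simp only [List.drop_zero]
      rw [scores_eq R, loopA_spec]
    set l : List Int := (List.range R.length).map (fun i : Nat => hiScore R (i : Int) 0) with hl
    have hlne : l ≠ [] := by
      intro hnil
      have := congrArg List.length hnil
      simp only [hl, List.length_map, List.length_range, List.length_nil] at this
      omega
    have hmax : PySem.List.max? l (fun x => x) = some (MHi R 0) := by
      have hM : maxList l = MHi R 0 := by rw [hl]; rfl
      cases hlc : l with
      | nil => exact absurd hlc hlne
      | cons s0 rest =>
        rw [PySem.List.max?_id_cons]
        have hs0 : 0 ≤ s0 := by
          have hmem : s0 ∈ l := by rw [hlc]; exact List.mem_cons_self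
          rw [hl] at hmem
          rcases List.mem_map.mp hmem with ⟨i, _, rfl⟩
          exact hiScore_nonneg R _ 0
        rw [← hM, hlc]
        unfold maxList
        rw [List.foldl_cons, max_eq_right hs0]
    -- B's side: the elimination loop ends in the argmax set with its any-win flag
    have hB : findChampionship_alt R =
        (if decide (0 < MHi R 0) = false then none
         else match candsAt R 0 with
         | [] => none
         | i :: _ => some (i + 1)) := by
      unfold findChampionship_alt
      simp only
      rw [if_neg hn0]
      have hinit : ((PySem.List.pyRange 0 ((R.length : Int)) 1 : List Int), false)
          = ((candsAt R R.length : List Int), decide (0 < MHi R R.length)) := by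
        rw [candsAt_top, MHi_top, PySem.List.pyRange_zero_nat]
        simp
      rw [hinit, B_loop R R.length (le_refl _)]
    have hA' : findChampionship R =
        (if MHi R 0 ≤ 0 then none
         else some (((0 : Nat) : Int) + ((l.idxOf (MHi R 0) : Nat) : Int) + 1)) := by
      rw [hA, hmax]
    rw [hA', hB]
    have hM0 := MHi_nonneg R 0
    by_cases hz : MHi R 0 = 0
    · rw [hz]
      simp
    · rw [if_neg (by omega)]
      rw [show (decide (0 < MHi R 0)) = true by simp only [decide_eq_true_eq]; omega]
      rw [if_neg (by simp)]
      have hhead := candsAt_zero_head R hn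
      rcases hc : candsAt R 0 with _ | ⟨c, cs⟩
      · rw [hc] at hhead
        simp at hhead
      · rw [hc] at hhead
        simp only [List.head?_cons, Option.some_inj] at hhead
        rw [hhead, ← hl]
        congr 1
        push_cast
        ring
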